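-- pv_equiv track=rewrite | github.com/FloncDev/emerging-exceptions | src/OpenCV Image Handling/Opencv image handling.py | str_to_colour_list
-- ===== SOURCE A (Python) =====
-- import math
--
-- def baseconvert2(num: int, base: int) -> str:
--     if base == 10:
--         return str(num)
--     if base == 1:
--         return ('1'*num).zfill(1)
--     max_length = math.floor(math.log(num) / math.log(base))
--     current_num = num
--     return_str = ''
--     for notation in range(max_length,-1,-1):
--         notation_value = base**notation
--         if current_num >= notation_value:
--             return_str += str(current_num//notation_value)
--             current_num -= (current_num//notation_value)*notation_value
--         else:
--             return_str += '0'
--     return return_str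
--
-- def str_to_colour_list(SecretMsg: str):
--     r_colour = (255,0,0)
--     g_colour = (0,255,0)
--     b_colour = (0,0,255)
--     m_colour = (255,0,255)
--     c_colour = (0,255,255)
--     y_colour = (255,255,0)
--     w_colour = (255,255,255)
--     colour_list = []
--     base_3_list = []
--     str_integer_list = list(SecretMsg.encode('utf-8'))
--
--     for a in str_integer_list:
--         base_3_num = baseconvert2(a,3)
--         base_3_num = base_3_num.zfill(3)
--         base_3_list.append(base_3_num)
--
--     for j in str(base_3_list):
--         if j == "0":
--             colour_list.append(r_colour)
--         elif j == "1":
--             colour_list.append(g_colour)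
--         elif j == "2":
--             colour_list.append(b_colour)
--         elif j == "3":
--             colour_list.append(m_colour)
--         elif j == "4":
--             colour_list.append(c_colour)
--         elif j == "5":
--             colour_list.append(y_colour)
--     for i in range(4):
--         colour_list.append(w_colour)
--     return colour_list
-- ===== SOURCE B (Python) =====
-- def str_to_colour_list(SecretMsg: str):
--     colours = {'0': (255, 0, 0), '1': (0, 255, 0), '2': (0, 0, 255),
--                '3': (255, 0, 255), '4': (0, 255, 255), '5': (255, 255, 0)}
--     out = []
--     for byte in SecretMsg.encode('utf-8'):
--         digits = ''
--         n = byte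
--         while n:
--             digits = str(n % 3) + digits
--             n //= 3
--         for d in digits.zfill(3):
--             out.append(colours[d])
--     out.extend([(255, 255, 255)] * 4)
--     return out
-- ===== Notes on version B (the rewrite author's own statement) =====
-- stated objective: simpler
-- what changed: B replaces A's two-phase pipeline (log-based base-3 conversion into a list, then a character scan of the list's str() repr with a 6-way if/elif chain) by one fused pass: a divmod while-loop producing each byte's base-3 digits and a digit-to-colour dict lookup, with no intermediate list and no repr scan.
import Mathlib
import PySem

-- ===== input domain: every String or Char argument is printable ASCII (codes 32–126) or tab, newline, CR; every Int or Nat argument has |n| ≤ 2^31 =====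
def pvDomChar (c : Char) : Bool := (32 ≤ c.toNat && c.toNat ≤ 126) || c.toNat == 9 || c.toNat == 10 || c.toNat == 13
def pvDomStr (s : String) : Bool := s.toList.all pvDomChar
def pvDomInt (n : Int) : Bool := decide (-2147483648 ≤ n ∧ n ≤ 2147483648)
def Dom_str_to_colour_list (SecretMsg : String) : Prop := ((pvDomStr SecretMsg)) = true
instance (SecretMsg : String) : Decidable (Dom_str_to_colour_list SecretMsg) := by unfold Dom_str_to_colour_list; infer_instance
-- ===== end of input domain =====

-- B fuses A's two phases (build base-3 string list, then scan its str() repr) into one pass per byte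
-- with a digit→colour dict — simpler: no intermediate list and no repr-of-list scan.


-- ===== PORT A =====

-- hand port of math.floor(math.log num / math.log base) (PySem has no float log):
-- equals the integer floor-log; exact vs CPython for 1 ≤ num ≤ 126, base = 3 (all values reached on Dom)
def pyLogFloor (num base : Int) : Int := (Nat.log base.toNat num.toNat : Int)

def baseconvert2 (num base : Int) : List Char :=
  if base = 10 then PySem.Int.toChars num
  else if base = 1 then
    -- ('1'*num).zfill(1): hand port (zfill(1) pads only the empty string, to "0"); exact
    let s := List.replicate num.toNat '1'
    if s = [] then ['0'] else s
  else
    let res := (PySem.List.pyRange (pyLogFloor num base) (-1) (-1)).foldl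
      (fun (st : Int × List Char) nota =>
        let notation_value := base ^ nota.toNat   -- base**nota; every nota here is ≥ 0
        if st.1 ≥ notation_value then
          (st.1 - (PySem.Int.floordiv st.1 notation_value) * notation_value,
           st.2 ++ PySem.Int.toChars (PySem.Int.floordiv st.1 notation_value))
        else (st.1, st.2 ++ ['0'])) (num, [])
    res.2

-- hand port of s.zfill(3) for sign-free strings (all strings here are base-3 digits); exact
def zfill3 (s : List Char) : List Char := List.replicate (3 - s.length) '0' ++ s

-- hand port of str(list_of_str) for strings containing no quotes/backslashes; exact
def pyReprInner : List (List Char) → List Char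
  | [] => []
  | [s] => '\'' :: s ++ ['\'']
  | s :: rest => '\'' :: s ++ '\'' :: ',' :: ' ' :: pyReprInner rest

def pyStrList (l : List (List Char)) : List Char := '[' :: pyReprInner l ++ [']']

def str_to_colour_list (SecretMsg : String) : List (Int × Int × Int) :=
  let r_colour : Int × Int × Int := (255, 0, 0)
  let g_colour : Int × Int × Int := (0, 255, 0)
  let b_colour : Int × Int × Int := (0, 0, 255)
  let m_colour : Int × Int × Int := (255, 0, 255)
  let c_colour : Int × Int × Int := (0, 255, 255)
  let y_colour : Int × Int × Int := (255, 255, 0)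
  let w_colour : Int × Int × Int := (255, 255, 255)
  -- list(SecretMsg.encode('utf-8')): exact on Dom (ASCII, one byte per char)
  let str_integer_list : List Int := SecretMsg.toList.map (fun c => (c.toNat : Int))
  let base_3_list : List (List Char) :=
    str_integer_list.foldl (fun acc a => acc ++ [zfill3 (baseconvert2 a 3)]) []
  let colour_list := (pyStrList base_3_list).foldl
    (fun acc j =>
      if j = '0' then acc ++ [r_colour]
      else if j = '1' then acc ++ [g_colour]
      else if j = '2' then acc ++ [b_colour]
      else if j = '3' then acc ++ [m_colour]
      else if j = '4' then acc ++ [c_colour]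
      else if j = '5' then acc ++ [y_colour]
      else acc) []
  (PySem.List.pyRange 0 4 1).foldl (fun acc _ => acc ++ [w_colour]) colour_list

-- ===== PORT B =====

-- Source B's while loop: digits = str(n%3)+digits; n //= 3 (n is a byte, hence ≥ 0);
-- fuel n only makes the recursion structural: n/3 reaches 0 within n steps for every n
def b3DigitsAux : Nat → Nat → List Char
  | 0, _ => []
  | fuel + 1, n => if n = 0 then [] else b3DigitsAux fuel (n / 3) ++ [Char.ofNat (48 + n % 3)]

def b3Digits (n : Nat) : List Char := b3DigitsAux n n

def colourDict : PySem.Dict Char (Int × Int × Int) :=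
  PySem.Dict.ofList [('0', (255, 0, 0)), ('1', (0, 255, 0)), ('2', (0, 0, 255)),
                     ('3', (255, 0, 255)), ('4', (0, 255, 255)), ('5', (255, 255, 0))]

def str_to_colour_list_alt (SecretMsg : String) : List (Int × Int × Int) :=
  let out := SecretMsg.toList.foldl (fun acc c =>
    -- colours[d]: KeyError unreachable, every d is '0'/'1'/'2'; default never read
    (zfill3 (b3Digits c.toNat)).foldl
      (fun acc2 d => acc2 ++ [(colourDict.get? d).getD (0, 0, 0)]) acc) []
  out ++ List.replicate 4 (255, 255, 255)

-- ===== PRECONDITION & SPEC =====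
def Spec_str_to_colour_list (SecretMsg : String) (out : List (Int × Int × Int)) : Prop := out = str_to_colour_list_alt SecretMsg
instance (SecretMsg : String) (out : List (Int × Int × Int)) : Decidable (Spec_str_to_colour_list SecretMsg out) := by unfold Spec_str_to_colour_list; infer_instance

-- ===== CLAIM (what is proved, stated in full; the proofs are below) =====
def Claim_equal_str_to_colour_list : Prop := ∀ (SecretMsg : String), Dom_str_to_colour_list SecretMsg → Spec_str_to_colour_list SecretMsg (str_to_colour_list SecretMsg)

-- ===== LEMMAS AND PROOFS =====

-- the contribution of one scanned character in A's repr scan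
def pvG (j : Char) : List (Int × Int × Int) :=
  if j = '0' then [(255, 0, 0)]
  else if j = '1' then [(0, 255, 0)]
  else if j = '2' then [(0, 0, 255)]
  else if j = '3' then [(255, 0, 255)]
  else if j = '4' then [(0, 255, 255)]
  else if j = '5' then [(255, 255, 0)]
  else []

theorem pvG_flatMap_inner (L : List (List Char)) :
    (pyReprInner L).flatMap pvG = L.flatMap (fun s => s.flatMap pvG) := by
  induction L with
  | nil => rfl
  | cons s rest ih =>
    cases rest with
    | nil => simp [pyReprInner, pvG]
    | cons t r =>
      simp only [pyReprInner] at ih ⊢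
      simp [List.flatMap_cons, List.flatMap_append, ih, pvG]

theorem pvG_flatMap_repr (L : List (List Char)) :
    (pyStrList L).flatMap pvG = L.flatMap (fun s => s.flatMap pvG) := by
  simp [pyStrList, List.flatMap_append, pvG_flatMap_inner, pvG]

-- per-byte agreement, checked by computation over all byte values reachable on Dom
theorem pvPerByte : ∀ n : Nat, n < 127 →
    (zfill3 (baseconvert2 (n : Int) 3)).flatMap pvG =
      (zfill3 (b3Digits n)).map (fun d => (colourDict.get? d).getD (0, 0, 0)) := by
  decide

theorem pvFlatMap_congr {α β : Type} (l : List α) (f f' : α → List β)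
    (h : ∀ x ∈ l, f x = f' x) : l.flatMap f = l.flatMap f' := by
  induction l with
  | nil => rfl
  | cons x xs ih => simp only [List.flatMap_cons, h x (by simp), ih (fun y hy => h y (by simp [hy]))]

-- ===== VERDICT (by name: the statement is the Claim_ definition above) =====
theorem str_to_colour_list_spec : Claim_equal_str_to_colour_list := by
  intro s hDom
  unfold Spec_str_to_colour_list str_to_colour_list str_to_colour_list_alt
  simp only [PySem.List.foldl_append_singleton_eq_map, List.nil_append]
  -- A's scan loop body is acc ++ pvG j
  have hbody : (fun (acc : List (Int × Int × Int)) (j : Char) =>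
      if j = '0' then acc ++ [((255 : Int), (0 : Int), (0 : Int))]
      else if j = '1' then acc ++ [((0 : Int), (255 : Int), (0 : Int))]
      else if j = '2' then acc ++ [((0 : Int), (0 : Int), (255 : Int))]
      else if j = '3' then acc ++ [((255 : Int), (0 : Int), (255 : Int))]
      else if j = '4' then acc ++ [((0 : Int), (255 : Int), (255 : Int))]
      else if j = '5' then acc ++ [((255 : Int), (255 : Int), (0 : Int))]
      else acc) = fun acc j => acc ++ pvG j := by
    funext acc j; simp only [pvG]; split_ifs <;> simp
  rw [hbody, PySem.List.foldl_append_eq_flatMap, pvG_flatMap_repr,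
      PySem.List.foldl_append_eq_flatMap]
  simp only [List.nil_append, List.flatMap_map, List.map_map]
  have hw : (PySem.List.pyRange 0 4 1).map (fun _ => ((255:Int),(255:Int),(255:Int))) = List.replicate 4 ((255:Int),(255:Int),(255:Int)) := by decide
  rw [hw]
  congr 1
  · apply pvFlatMap_congr
    intro c hc
    have hdc : pvDomChar c = true := List.all_eq_true.mp hDom c hc
    have hlt : c.toNat < 127 := by
      simp only [pvDomChar, Bool.or_eq_true, Bool.and_eq_true, decide_eq_true_eq,
        beq_iff_eq] at hdc
      omega
    exact pvPerByte c.toNat hlt
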